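-- pv_equiv track=rewrite | github.com/MUICT-SERU/SP2023-Greeedhub | PythonFiles_keep/ieml/b2dd97c0/f4759422010c50a97d728de6ffef4d43c6cefe2b/f4759422010c50a97d728de6ffef4d43c6cefe2b_ieml_b2dd97c0_20160716_211417_before_1.py | partition_graph
-- ===== SOURCE A (Python) =====
-- def partition_graph(graph):
--
--     partitions = []
--     explored = set()
--
--     def _explore_graph(node, graph, p):
--
--         if node not in explored:
--             p.add(node)
--         explored.add(node)
--         for adjacent_node in graph[node]:
--             if adjacent_node not in explored:
--                 return _explore_graph(adjacent_node, graph, p)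
--         return
--
--     for node in graph:
--         p = set()
--         _explore_graph(node, graph, p)
--
--         if p:
--             partitions.append(p)
--
--     return partitions
-- ===== SOURCE B (Python) =====
-- def partition_graph(graph):
--     partitions = []
--     explored = set()
--     for node in graph:
--         # build the whole walk as an explicit path list first
--         path = [node]
--         seen = set(explored)
--         seen.add(node)
--         while True:
--             nxt = next((a for a in graph[path[-1]] if a not in seen), None)
--             if nxt is None:
--                 break
--             path.append(nxt)
--             seen.add(nxt)
--         # newly explored nodes along the walk form the partition
--         p = set(path) - explored
--         explored.update(path)
--         if p:
--             partitions.append(p)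
--     return partitions
-- ===== Notes on version B (the rewrite author's own statement) =====
-- stated objective: alternative
-- what changed: A's recursive _explore_graph that mutates the partition set and explored set per call is replaced by an iterative walk that first materialises the whole path as a list and then derives the partition with one set difference and the explored set with one update.
-- outside the precondition, e.g. on partition_graph({'a': ['b', 'X'], 'b': []}): A returns [{'a', 'b'}], B returns [{'a', 'b'}]
import Mathlib
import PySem

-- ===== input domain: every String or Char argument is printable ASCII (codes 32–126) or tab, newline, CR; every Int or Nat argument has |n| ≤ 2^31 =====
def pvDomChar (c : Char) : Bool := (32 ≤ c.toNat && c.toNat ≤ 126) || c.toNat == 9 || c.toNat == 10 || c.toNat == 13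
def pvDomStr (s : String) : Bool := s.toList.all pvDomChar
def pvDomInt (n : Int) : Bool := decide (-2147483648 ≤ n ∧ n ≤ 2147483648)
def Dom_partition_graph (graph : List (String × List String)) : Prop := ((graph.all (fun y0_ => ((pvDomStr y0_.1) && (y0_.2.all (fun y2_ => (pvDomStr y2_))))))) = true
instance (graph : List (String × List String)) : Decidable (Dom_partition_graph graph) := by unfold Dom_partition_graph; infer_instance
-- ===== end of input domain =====

-- B replaces A's recursive path-following helper by an iterative walk that first builds the
-- whole path as an explicit list and then forms the partition by one set difference (objective: alternative decomposition).

-- ===== PORT A =====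
-- A's recursive `_explore_graph`: adds `node` to p if unexplored, marks it explored, then
-- recurses into the first unexplored neighbour.  The fuel argument is a totality guard only:
-- inside Pre_ every visited node is a key, so at most `graph.length` calls happen (proved below).
def pvExploreA (g : PySem.Dict String (List String)) :
    Nat → String → PySem.Set String → PySem.Set String → PySem.Set String × PySem.Set String
  | 0, _, explored, p => (explored, p)          -- fuel exhausted: unreachable inside Pre_
  | fuel+1, node, explored, p =>
    let p' := if PySem.Set.contains explored node then p else PySem.Set.add p node
    let explored' := PySem.Set.add explored node
    match g.get? node with
    | none => (explored', p')                    -- Python raises KeyError here: excluded by Pre_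
    | some adj =>
      match adj.find? (fun a => !(PySem.Set.contains explored' a)) with
      | none => (explored', p')
      | some a => pvExploreA g fuel a explored' p'

def partition_graph (graph : List (String × List String)) : List (List String) :=
  let g := PySem.Dict.ofList graph
  ((PySem.Dict.keys g).foldl
    (fun (st : PySem.Set String × List (List String)) node =>
      let r := pvExploreA g (graph.length + 1) node st.1 PySem.Set.empty
      (r.1, if r.2.isEmpty then st.2 else st.2 ++ [r.2]))
    (PySem.Set.empty, [])).2

-- ===== PORT B =====
-- B's iterative walk: builds the whole path as a list (same fuel guard as A's port).
def pvWalkB (g : PySem.Dict String (List String)) :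
    Nat → List String → PySem.Set String → List String
  | 0, path, _ => path                           -- fuel exhausted: unreachable inside Pre_
  | fuel+1, path, seen =>
    match PySem.List.pyGet? path (-1) with       -- path[-1]; path is never empty
    | none => path
    | some cur =>
      match g.get? cur with
      | none => path                             -- Python raises KeyError here: excluded by Pre_
      | some adj =>
        match adj.find? (fun a => !(PySem.Set.contains seen a)) with
        | none => path
        | some nxt => pvWalkB g fuel (path ++ [nxt]) (PySem.Set.add seen nxt)

def partition_graph_alt (graph : List (String × List String)) : List (List String) :=
  let g := PySem.Dict.ofList graph
  ((PySem.Dict.keys g).foldl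
    (fun (st : PySem.Set String × List (List String)) node =>
      let path := pvWalkB g (graph.length + 1) [node] (PySem.Set.add st.1 node)
      let p := PySem.Set.diff (PySem.Set.ofList path) st.1
      (PySem.Set.update st.1 path, if p.isEmpty then st.2 else st.2 ++ [p]))
    (PySem.Set.empty, [])).2

-- ===== PRECONDITION & SPEC =====
-- Pre_ requires every listed neighbour to be a key of the dict: following an unlisted
-- neighbour raises KeyError in Python.  This also excludes some inputs on which A returns
-- because the unlisted neighbour happens never to be followed (both programs agree there).
def Pre_partition_graph (graph : List (String × List String)) : Prop :=
  ∀ vs ∈ (PySem.Dict.ofList graph).values, ∀ v ∈ vs,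
    (PySem.Dict.ofList graph).contains v = true
instance (graph : List (String × List String)) : Decidable (Pre_partition_graph graph) := by
  unfold Pre_partition_graph; infer_instance

def pvWitness_partition_graph : (List (String × List String)) :=
  [("a", ["b"]), ("b", ["a", "c"]), ("c", [])]

def Spec_partition_graph (graph : List (String × List String)) (out : List (List String)) : Prop := out = partition_graph_alt graph
instance (graph : List (String × List String)) (out : List (List String)) : Decidable (Spec_partition_graph graph out) := by unfold Spec_partition_graph; infer_instance

-- ===== CLAIM (what is proved, stated in full; the proofs are below) =====
def Claim_equal_partition_graph : Prop := ∀ (graph : List (String × List String)), Dom_partition_graph graph → Pre_partition_graph graph → Spec_partition_graph graph (partition_graph graph)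

-- ===== LEMMAS AND PROOFS =====

-- the tail of the walk after the current node (proof-side description of both loops)
def pvRest (g : PySem.Dict String (List String)) :
    Nat → String → PySem.Set String → List String
  | 0, _, _ => []
  | fuel+1, cur, seen =>
    match g.get? cur with
    | none => []
    | some adj =>
      match adj.find? (fun a => !(PySem.Set.contains seen a)) with
      | none => []
      | some a => a :: pvRest g fuel a (PySem.Set.add seen a)

-- number of keys not yet seen (termination measure)
def pvFresh (g : PySem.Dict String (List String)) (s : PySem.Set String) : Nat :=
  ((PySem.Dict.keys g).filter (fun k => !PySem.Set.contains s k)).length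

theorem pv_length_filter_lt {α : Type} (l : List α) (p q : α → Bool)
    (hpq : ∀ x, p x = true → q x = true) (a : α) (ha : a ∈ l)
    (hpa : p a = false) (hqa : q a = true) :
    (l.filter p).length < (l.filter q).length := by
  induction l with
  | nil => cases ha
  | cons x t ih =>
    have hle : (t.filter p).length ≤ (t.filter q).length :=
      List.Sublist.length_le (List.monotone_filter_right t (by intro x hx; exact hpq x hx))
    rcases List.mem_cons.mp ha with rfl | hat
    · simp [List.filter, hpa, hqa]
      exact hle
    · by_cases hx : p x = true
      · simp [List.filter, hx, hpq x hx]
        exact ih hat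
      · have hx' : p x = false := by simpa using hx
        cases hqx : q x <;> simp [List.filter, hx', hqx]
        · exact ih hat
        · exact Nat.le_of_lt (ih hat)

theorem pv_fresh_lt (g : PySem.Dict String (List String)) (seen : PySem.Set String) (a : String)
    (hk : a ∈ PySem.Dict.keys g) (hns : PySem.Set.contains seen a = false) :
    pvFresh g (PySem.Set.add seen a) < pvFresh g seen := by
  unfold pvFresh
  refine pv_length_filter_lt _ _ _ ?_ a hk ?_ ?_
  · intro x hx
    simp only [Bool.not_eq_true'] at hx ⊢
    cases hc : PySem.Set.contains seen x
    · rfl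
    · exfalso
      have hmem : x ∈ PySem.Set.add seen a := (PySem.Set.mem_add seen a x).mpr
        (Or.inl ((PySem.Set.contains_iff seen x).mp hc))
      rw [← PySem.Set.contains_iff] at hmem
      rw [hmem] at hx; cases hx
  · have h : PySem.Set.contains (PySem.Set.add seen a) a = true :=
      (PySem.Set.contains_iff _ a).mpr ((PySem.Set.mem_add seen a a).mpr (Or.inr rfl))
    rw [h]; rfl
  · simp only [Bool.not_eq_true']
    exact hns

theorem pvWalkB_eq_rest (g : PySem.Dict String (List String)) :
    ∀ (fuel : Nat) (pre : List String) (cur : String) (seen : PySem.Set String),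
      pvWalkB g fuel (pre ++ [cur]) seen = pre ++ cur :: pvRest g fuel cur seen := by
  intro fuel
  induction fuel with
  | zero => intro pre cur seen; rw [pvWalkB, pvRest]
  | succ fuel ih =>
    intro pre cur seen
    have hget : PySem.List.pyGet? (pre ++ [cur]) (-1) = some cur := by
      simp [PySem.List.pyGet?, PySem.List.pyIdx?]
    cases hg : g.get? cur with
    | none => simp only [pvWalkB, pvRest, hget, hg]
    | some adj =>
      cases hf : adj.find? (fun a => !(PySem.Set.contains seen a)) with
      | none => simp only [pvWalkB, pvRest, hget, hg, hf]
      | some a =>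
        simp only [pvWalkB, pvRest, hget, hg, hf]
        rw [ih (pre ++ [cur]) a (PySem.Set.add seen a)]
        simp

theorem pvRest_not_mem_seen (g : PySem.Dict String (List String)) :
    ∀ (fuel : Nat) (cur : String) (seen : PySem.Set String),
      ∀ x ∈ pvRest g fuel cur seen, x ∉ seen := by
  intro fuel
  induction fuel with
  | zero => intro cur seen x hx; rw [pvRest] at hx; cases hx
  | succ fuel ih =>
    intro cur seen x hx
    rw [pvRest] at hx
    cases hg : g.get? cur with
    | none => rw [hg] at hx; cases hx
    | some adj =>
      rw [hg] at hx
      simp only at hx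
      cases hf : adj.find? (fun a => !(PySem.Set.contains seen a)) with
      | none => rw [hf] at hx; cases hx
      | some a =>
        rw [hf] at hx
        have hfa := List.find?_some hf
        have ha : a ∉ seen := by
          simp only [Bool.not_eq_true'] at hfa
          intro h; rw [(PySem.Set.contains_iff seen a).mpr h] at hfa; cases hfa
        rcases List.mem_cons.mp hx with rfl | hx'
        · exact ha
        · intro hxs
          exact ih a (PySem.Set.add seen a) x hx'
            ((PySem.Set.mem_add seen a x).mpr (Or.inl hxs))

theorem pvRest_nodup (g : PySem.Dict String (List String)) :
    ∀ (fuel : Nat) (cur : String) (seen : PySem.Set String),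
      (pvRest g fuel cur seen).Nodup := by
  intro fuel
  induction fuel with
  | zero => intro cur seen; rw [pvRest]; exact List.nodup_nil
  | succ fuel ih =>
    intro cur seen
    rw [pvRest]
    cases hg : g.get? cur with
    | none => exact List.nodup_nil
    | some adj =>
      simp only
      cases hf : adj.find? (fun a => !(PySem.Set.contains seen a)) with
      | none => exact List.nodup_nil
      | some a =>
        refine List.nodup_cons.mpr ⟨?_, ih a (PySem.Set.add seen a)⟩
        intro hmem
        exact pvRest_not_mem_seen g fuel a (PySem.Set.add seen a) a hmem
          ((PySem.Set.mem_add seen a a).mpr (Or.inr rfl))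

theorem pvExploreA_eq_rest (graph : List (String × List String))
    (hpre : Pre_partition_graph graph) :
    ∀ (fuel : Nat) (cur : String) (E P : PySem.Set String),
      pvFresh (PySem.Dict.ofList graph) (PySem.Set.add E cur) < fuel →
      pvExploreA (PySem.Dict.ofList graph) fuel cur E P =
        (PySem.Set.update E (cur :: pvRest (PySem.Dict.ofList graph) fuel cur (PySem.Set.add E cur)),
         PySem.Set.update (if PySem.Set.contains E cur then P else PySem.Set.add P cur)
           (pvRest (PySem.Dict.ofList graph) fuel cur (PySem.Set.add E cur))) := by
  intro fuel
  induction fuel with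
  | zero => intro cur E P hlt; exact absurd hlt (Nat.not_lt_zero _)
  | succ fuel ih =>
    intro cur E P hlt
    cases hg : (PySem.Dict.ofList graph).get? cur with
    | none =>
      simp only [pvExploreA, pvRest, hg, PySem.Set.update_cons, PySem.Set.update_nil]
    | some adj =>
      cases hf : adj.find? (fun a => !(PySem.Set.contains (PySem.Set.add E cur) a)) with
      | none =>
        simp only [pvExploreA, pvRest, hg, hf, PySem.Set.update_cons, PySem.Set.update_nil]
      | some a =>
        have hfa := List.find?_some hf
        have hmem := List.mem_of_find?_eq_some hf
        have hca : PySem.Set.contains (PySem.Set.add E cur) a = false := by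
          cases h : PySem.Set.contains (PySem.Set.add E cur) a
          · rfl
          · rw [h] at hfa; cases hfa
        have hval : adj ∈ (PySem.Dict.ofList graph).values := by
          have := PySem.Dict.mem_items_of_get?_eq_some (PySem.Dict.ofList graph) hg
          exact List.mem_map.mpr ⟨(cur, adj), this, rfl⟩
        have hak : a ∈ PySem.Dict.keys (PySem.Dict.ofList graph) :=
          (PySem.Dict.contains_iff_mem_keys _ _).mp (hpre adj hval a hmem)
        have hlt' : pvFresh (PySem.Dict.ofList graph)
            (PySem.Set.add (PySem.Set.add E cur) a) < fuel := by
          have := pv_fresh_lt (PySem.Dict.ofList graph) (PySem.Set.add E cur) a hak hca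
          omega
        simp only [pvExploreA, pvRest, hg, hf]
        rw [ih a (PySem.Set.add E cur)
          (if PySem.Set.contains E cur then P else PySem.Set.add P cur) hlt']
        simp only [PySem.Set.update_cons, hca]
        simp

theorem pv_fresh_le (graph : List (String × List String)) (s : PySem.Set String) :
    pvFresh (PySem.Dict.ofList graph) s ≤ graph.length := by
  unfold pvFresh
  calc ((PySem.Dict.keys (PySem.Dict.ofList graph)).filter
          (fun k => !PySem.Set.contains s k)).length
      ≤ (PySem.Dict.keys (PySem.Dict.ofList graph)).length := List.length_filter_le _ _
    _ ≤ graph.length := by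
        have h : PySem.Dict.ofList graph =
            graph.foldl (fun (d : PySem.Dict String (List String)) p => d.insert p.1 p.2)
              PySem.Dict.empty := rfl
        rw [h, PySem.Dict.keys_foldl_insert_key graph (fun p => p.1) (fun _ p => p.2)]
        have h2 : (PySem.Dict.keys (PySem.Dict.empty (κ := String) (ν := List String))) = [] := rfl
        rw [h2, PySem.Set.update_nil_left]
        calc (PySem.Set.ofList (graph.map (fun p => p.1))).length
            ≤ (graph.map (fun p => p.1)).length := PySem.Set.length_ofList_le _
          _ = graph.length := List.length_map _

-- ===== VERDICT (by name: the statement is the Claim_ definition above) =====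
theorem partition_graph_spec : Claim_equal_partition_graph := by
  intro graph _ hpre
  unfold Spec_partition_graph partition_graph partition_graph_alt
  simp only
  congr 1
  apply PySem.List.foldl_congr_mem
  intro acc node _
  have hlt : pvFresh (PySem.Dict.ofList graph) (PySem.Set.add acc.1 node) < graph.length + 1 :=
    Nat.lt_succ_of_le (pv_fresh_le graph _)
  rw [pvExploreA_eq_rest graph hpre (graph.length + 1) node acc.1 PySem.Set.empty hlt]
  have hW : pvWalkB (PySem.Dict.ofList graph) (graph.length + 1) [node]
      (PySem.Set.add acc.1 node) =
      node :: pvRest (PySem.Dict.ofList graph) (graph.length + 1) node (PySem.Set.add acc.1 node) := by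
    have := pvWalkB_eq_rest (PySem.Dict.ofList graph) (graph.length + 1) [] node
      (PySem.Set.add acc.1 node)
    simpa using this
  rw [hW]
  set R := pvRest (PySem.Dict.ofList graph) (graph.length + 1) node (PySem.Set.add acc.1 node) with hR
  have hRf : ∀ x ∈ R, x ∉ PySem.Set.add acc.1 node :=
    pvRest_not_mem_seen (PySem.Dict.ofList graph) (graph.length + 1) node (PySem.Set.add acc.1 node)
  have hRnd : R.Nodup := pvRest_nodup (PySem.Dict.ofList graph) _ _ _
  have hRE : ∀ x ∈ R, x ∉ acc.1 := by
    intro x hx hmem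
    exact hRf x hx ((PySem.Set.mem_add acc.1 node x).mpr (Or.inl hmem))
  have hRnode : ∀ x ∈ R, x ≠ node := by
    intro x hx heq
    exact hRf x hx ((PySem.Set.mem_add acc.1 node x).mpr (Or.inr heq))
  have hnodeR : node ∉ R := fun h => (hRnode node h) rfl
  have hnodup : (node :: R).Nodup := List.nodup_cons.mpr ⟨hnodeR, hRnd⟩
  have hofl : PySem.Set.ofList (node :: R) = node :: R :=
    PySem.Set.ofList_eq_self_of_nodup _ hnodup
  rw [hofl]
  have hfR : List.filter (fun x => !decide (x ∈ acc.1)) R = R :=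
    List.filter_eq_self.mpr (fun x hx => by simp [hRE x hx])
  have hP0 : ∀ x ∈ R, x ∉ (if PySem.Set.contains acc.1 node then PySem.Set.empty
      else PySem.Set.add PySem.Set.empty node : PySem.Set String) := by
    intro x hx
    by_cases hm : node ∈ acc.1 <;>
      simp [PySem.Set.add, PySem.Set.empty, PySem.Set.contains, hm]
    exact hRnode x hx
  have hupd : PySem.Set.update (if PySem.Set.contains acc.1 node then PySem.Set.empty
      else PySem.Set.add PySem.Set.empty node) R =
      (if PySem.Set.contains acc.1 node then PySem.Set.empty
       else PySem.Set.add PySem.Set.empty node) ++ R :=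
    PySem.Set.update_eq_append_of_disjoint _ R hRnd hP0
  rw [hupd]
  by_cases hm : node ∈ acc.1 <;>
    simp [PySem.Set.diff, List.filter, hfR, hm, PySem.Set.add, PySem.Set.empty,
      PySem.Set.contains]
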